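-- pv_equiv track=rewrite | github.com/tamohannes/clausius | app.py | parse_squeue_output
-- ===== SOURCE A (Python) =====
-- STATE_ORDER = {"RUNNING": 0, "COMPLETING": 1, "PENDING": 2, "FAILED": 3, "CANCELLED": 4}
--
-- SQUEUE_HDR = ["jobid", "name", "state", "reason", "elapsed", "timelimit", "nodes", "cpus", "gres", "partition", "submitted", "started"]
--
-- def parse_squeue_output(out):
--     jobs = []
--     for line in out.splitlines():
--         if not line.strip():
--             continue
--         parts = line.split("|")
--         if len(parts) < len(SQUEUE_HDR):
--             parts += [""] * (len(SQUEUE_HDR) - len(parts))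
--         jobs.append(dict(zip(SQUEUE_HDR, parts)))
--     jobs.sort(key=lambda j: STATE_ORDER.get(j.get("state", "").upper(), 99))
--     return jobs
-- ===== SOURCE B (Python) =====
-- STATE_ORDER = {"RUNNING": 0, "COMPLETING": 1, "PENDING": 2, "FAILED": 3, "CANCELLED": 4}
--
-- SQUEUE_HDR = ["jobid", "name", "state", "reason", "elapsed", "timelimit", "nodes", "cpus", "gres", "partition", "submitted", "started"]
--
-- def parse_squeue_output(out):
--     # one-pass bucket sort: six buckets (state order 0..4, unknown last) instead of sort
--     buckets = [[], [], [], [], [], []]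
--     for line in out.splitlines():
--         if not line.strip():
--             continue
--         parts = line.split("|")
--         if len(parts) < len(SQUEUE_HDR):
--             parts += [""] * (len(SQUEUE_HDR) - len(parts))
--         job = dict(zip(SQUEUE_HDR, parts))
--         buckets[STATE_ORDER.get(job.get("state", "").upper(), 5)].append(job)
--     return [job for bucket in buckets for job in bucket]
-- ===== Notes on version B (the rewrite author's own statement) =====
-- stated objective: alternative
-- what changed: The final stable sort by state-order key is replaced by a single-pass six-bucket split (state order 0..4 plus a last bucket for unknown states) whose buckets are concatenated in order, reproducing the stable sorted order without sorting; asymptotically O(n) vs the sort's O(n log n), though CPython's C-implemented sort makes this a wash in practice.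
import Mathlib
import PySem

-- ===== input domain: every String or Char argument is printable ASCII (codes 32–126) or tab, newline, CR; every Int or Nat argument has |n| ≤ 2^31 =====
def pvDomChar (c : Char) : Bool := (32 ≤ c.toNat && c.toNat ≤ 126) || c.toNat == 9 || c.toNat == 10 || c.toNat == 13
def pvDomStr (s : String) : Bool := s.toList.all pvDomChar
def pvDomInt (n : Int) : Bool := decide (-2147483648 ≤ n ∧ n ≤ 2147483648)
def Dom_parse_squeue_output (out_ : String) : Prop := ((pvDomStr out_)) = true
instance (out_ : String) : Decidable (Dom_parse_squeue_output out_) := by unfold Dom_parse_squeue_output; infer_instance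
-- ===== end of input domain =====

-- B replaces the final stable sort by state with a one-pass bucket split (six buckets, unknown states
-- last), which yields the identical stable order without sorting.

-- ===== PORT A =====
def pvStateOrder : PySem.Dict String Int :=
  PySem.Dict.ofList [("RUNNING", 0), ("COMPLETING", 1), ("PENDING", 2), ("FAILED", 3), ("CANCELLED", 4)]

def pvSqueueHdr : List String :=
  ["jobid", "name", "state", "reason", "elapsed", "timelimit", "nodes", "cpus", "gres",
   "partition", "submitted", "started"]

-- the identical per-line body of both Pythons' loop: split on "|", pad to the header length, zip into a dict
def pvParseLine (line : String) : PySem.Dict String String :=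
  let parts := (PySem.Str.split? line "|").getD []
  let parts := if parts.length < pvSqueueHdr.length
    then parts ++ List.replicate (pvSqueueHdr.length - parts.length) "" else parts
  PySem.Dict.ofList (pvSqueueHdr.zip parts)

def parse_squeue_output (out_ : String) : List (List (String × String)) :=
  let jobs := (PySem.Str.splitlines out_).foldl
    (fun jobs line =>
      if PySem.Str.strip line = "" then jobs else jobs ++ [pvParseLine line]) []
  (PySem.List.sorted jobs
      (fun j => pvStateOrder.getD (PySem.Str.upper (j.getD "state" "")) 99) false).map
    PySem.Dict.items

-- ===== PORT B =====
def parse_squeue_output_alt (out_ : String) : List (List (String × String)) :=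
  let buckets := (PySem.Str.splitlines out_).foldl
    (fun buckets line =>
      if PySem.Str.strip line = "" then buckets
      else
        let job := pvParseLine line
        buckets.modify (pvStateOrder.getD (PySem.Str.upper (job.getD "state" "")) 5).toNat
          (fun b => b ++ [job]))
    [[], [], [], [], [], []]
  buckets.flatten.map PySem.Dict.items

-- ===== PRECONDITION & SPEC =====
def Spec_parse_squeue_output (out_ : String) (out : List (List (String × String))) : Prop := out = parse_squeue_output_alt out_
instance (out_ : String) (out : List (List (String × String))) : Decidable (Spec_parse_squeue_output out_ out) := by unfold Spec_parse_squeue_output; infer_instance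

-- ===== CLAIM (what is proved, stated in full; the proofs are below) =====
def Claim_equal_parse_squeue_output : Prop := ∀ (out_ : String), Dom_parse_squeue_output out_ → Spec_parse_squeue_output out_ (parse_squeue_output out_)

-- ===== LEMMAS AND PROOFS =====

-- A's sort key and B's bucket index of a job
def pvKeyA (j : PySem.Dict String String) : Int :=
  pvStateOrder.getD (PySem.Str.upper (j.getD "state" "")) 99
def pvIdxB (j : PySem.Dict String String) : Nat :=
  (pvStateOrder.getD (PySem.Str.upper (j.getD "state" "")) 5).toNat

theorem pv_get?_cases (s : String) :
    pvStateOrder.get? s = none ∨ pvStateOrder.get? s = some 0 ∨ pvStateOrder.get? s = some 1 ∨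
    pvStateOrder.get? s = some 2 ∨ pvStateOrder.get? s = some 3 ∨ pvStateOrder.get? s = some 4 := by
  have h : pvStateOrder.items =
      [("RUNNING", (0:Int)), ("COMPLETING", 1), ("PENDING", 2), ("FAILED", 3), ("CANCELLED", 4)] := by
    decide
  simp only [PySem.Dict.get?, h, List.find?]
  cases ("RUNNING" == s) <;> cases ("COMPLETING" == s) <;> cases ("PENDING" == s) <;>
    cases ("FAILED" == s) <;> cases ("CANCELLED" == s) <;> simp

-- getD with the two defaults, for every lookup string
theorem pv_getD_cases (s : String) :
    (pvStateOrder.getD s 99 = 0 ∧ (pvStateOrder.getD s 5).toNat = 0) ∨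
    (pvStateOrder.getD s 99 = 1 ∧ (pvStateOrder.getD s 5).toNat = 1) ∨
    (pvStateOrder.getD s 99 = 2 ∧ (pvStateOrder.getD s 5).toNat = 2) ∨
    (pvStateOrder.getD s 99 = 3 ∧ (pvStateOrder.getD s 5).toNat = 3) ∨
    (pvStateOrder.getD s 99 = 4 ∧ (pvStateOrder.getD s 5).toNat = 4) ∨
    (pvStateOrder.getD s 99 = 99 ∧ (pvStateOrder.getD s 5).toNat = 5) := by
  rcases pv_get?_cases s with h|h|h|h|h|h <;> simp [PySem.Dict.getD, h]

-- the key takes one of six values, and B's bucket index matches it (99 ↦ last bucket)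
theorem pv_key_idx (j : PySem.Dict String String) :
    (pvKeyA j = 0 ∧ pvIdxB j = 0) ∨ (pvKeyA j = 1 ∧ pvIdxB j = 1) ∨ (pvKeyA j = 2 ∧ pvIdxB j = 2) ∨
    (pvKeyA j = 3 ∧ pvIdxB j = 3) ∨ (pvKeyA j = 4 ∧ pvIdxB j = 4) ∨ (pvKeyA j = 99 ∧ pvIdxB j = 5) := by
  unfold pvKeyA pvIdxB
  exact pv_getD_cases (PySem.Str.upper (j.getD "state" ""))

-- inserting into a list that starts with elements x goes after and ends with elements x goes before
theorem pv_insertBy_middle {α : Type} (before : α → α → Bool) (x : α) :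
    ∀ (A B : List α), (∀ a ∈ A, before x a = false) → (∀ b ∈ B, before x b = true) →
      PySem.List.insertBy before x (A ++ B) = A ++ x :: B := by
  intro A
  induction A with
  | nil =>
    intro B _ hB
    cases B with
    | nil => simp [PySem.List.insertBy]
    | cons y ys => simp [PySem.List.insertBy, hB y (by simp)]
  | cons a as ih =>
    intro B hA hB
    simp [PySem.List.insertBy, hA a (by simp)]
    exact ih B (fun a' ha' => hA a' (by simp [ha'])) hB

-- A's jobs loop builds the parsed list of the non-blank lines
theorem pv_jobs_eq (lines : List String) (acc : List (PySem.Dict String String)) :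
    lines.foldl
      (fun jobs line =>
        if PySem.Str.strip line = "" then jobs else jobs ++ [pvParseLine line]) acc
    = acc ++ (lines.filter (fun l => !(PySem.Str.strip l == ""))).map pvParseLine := by
  induction lines generalizing acc with
  | nil => simp
  | cons l ls ih =>
    by_cases h : PySem.Str.strip l = "" <;> simp [h, ih]

-- insertion goes after all elements of key ≤ and before a tail of keys >
theorem pv_insertBy_key {α : Type} (key : α → Int) (x : α) (A B : List α)
    (hA : ∀ a ∈ A, key a ≤ key x) (hB : ∀ b ∈ B, key x < key b) :
    PySem.List.insertBy (fun a b => decide (key a < key b)) x (A ++ B) = A ++ x :: B :=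
  pv_insertBy_middle _ x A B
    (fun a ha => by have := hA a ha; simp; omega)
    (fun b hb => by have := hB b hb; simpa)

-- the key-c bucket of xs
def pvF (c : Int) (xs : List (PySem.Dict String String)) : List (PySem.Dict String String) :=
  xs.filter (fun j => pvKeyA j == c)

-- the stable sort of a list whose keys lie in {0,1,2,3,4,99} is the concatenation of its key-buckets
theorem pv_sorted_buckets (xs : List (PySem.Dict String String)) :
    PySem.List.sorted xs pvKeyA false =
      pvF 0 xs ++ (pvF 1 xs ++ (pvF 2 xs ++ (pvF 3 xs ++ (pvF 4 xs ++ pvF 99 xs)))) := by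
  induction xs using List.reverseRecOn with
  | nil => simp [PySem.List.sorted, pvF]
  | append_singleton xs x ih =>
    have hstep : PySem.List.sorted (xs ++ [x]) pvKeyA false
        = PySem.List.insertBy (fun a b => decide (pvKeyA a < pvKeyA b)) x
            (PySem.List.sorted xs pvKeyA false) := by
      simp [PySem.List.sorted, List.foldl_append]
    have hk : ∀ (c : Int) (a : PySem.Dict String String), a ∈ pvF c xs → pvKeyA a = c := by
      intro c a ha
      have := List.of_mem_filter ha
      simpa using this
    rw [hstep, ih]
    rcases pv_key_idx x with ⟨h,_⟩|⟨h,_⟩|⟨h,_⟩|⟨h,_⟩|⟨h,_⟩|⟨h,_⟩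
    · rw [pv_insertBy_key pvKeyA x (pvF 0 xs) _
        (fun a ha => by rw [hk 0 a ha, h])
        (fun b hb => by
          simp only [List.mem_append] at hb
          rcases hb with hb|hb|hb|hb|hb <;> rw [hk _ b hb, h] <;> norm_num)]
      simp [pvF, List.filter_append, h, List.append_assoc]
    · rw [show pvF 0 xs ++ (pvF 1 xs ++ (pvF 2 xs ++ (pvF 3 xs ++ (pvF 4 xs ++ pvF 99 xs))))
          = (pvF 0 xs ++ pvF 1 xs) ++ (pvF 2 xs ++ (pvF 3 xs ++ (pvF 4 xs ++ pvF 99 xs)))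
          by simp [List.append_assoc]]
      rw [pv_insertBy_key pvKeyA x _ _
        (fun a ha => by
          simp only [List.mem_append] at ha
          rcases ha with ha|ha <;> rw [hk _ a ha, h] <;> norm_num)
        (fun b hb => by
          simp only [List.mem_append] at hb
          rcases hb with hb|hb|hb|hb <;> rw [hk _ b hb, h] <;> norm_num)]
      simp [pvF, List.filter_append, h, List.append_assoc]
    · rw [show pvF 0 xs ++ (pvF 1 xs ++ (pvF 2 xs ++ (pvF 3 xs ++ (pvF 4 xs ++ pvF 99 xs))))
          = (pvF 0 xs ++ (pvF 1 xs ++ pvF 2 xs)) ++ (pvF 3 xs ++ (pvF 4 xs ++ pvF 99 xs))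
          by simp [List.append_assoc]]
      rw [pv_insertBy_key pvKeyA x _ _
        (fun a ha => by
          simp only [List.mem_append] at ha
          rcases ha with ha|ha|ha <;> rw [hk _ a ha, h] <;> norm_num)
        (fun b hb => by
          simp only [List.mem_append] at hb
          rcases hb with hb|hb|hb <;> rw [hk _ b hb, h] <;> norm_num)]
      simp [pvF, List.filter_append, h, List.append_assoc]
    · rw [show pvF 0 xs ++ (pvF 1 xs ++ (pvF 2 xs ++ (pvF 3 xs ++ (pvF 4 xs ++ pvF 99 xs))))
          = (pvF 0 xs ++ (pvF 1 xs ++ (pvF 2 xs ++ pvF 3 xs))) ++ (pvF 4 xs ++ pvF 99 xs)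
          by simp [List.append_assoc]]
      rw [pv_insertBy_key pvKeyA x _ _
        (fun a ha => by
          simp only [List.mem_append] at ha
          rcases ha with ha|ha|ha|ha <;> rw [hk _ a ha, h] <;> norm_num)
        (fun b hb => by
          simp only [List.mem_append] at hb
          rcases hb with hb|hb <;> rw [hk _ b hb, h] <;> norm_num)]
      simp [pvF, List.filter_append, h, List.append_assoc]
    · rw [show pvF 0 xs ++ (pvF 1 xs ++ (pvF 2 xs ++ (pvF 3 xs ++ (pvF 4 xs ++ pvF 99 xs))))
          = (pvF 0 xs ++ (pvF 1 xs ++ (pvF 2 xs ++ (pvF 3 xs ++ pvF 4 xs)))) ++ pvF 99 xs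
          by simp [List.append_assoc]]
      rw [pv_insertBy_key pvKeyA x _ _
        (fun a ha => by
          simp only [List.mem_append] at ha
          rcases ha with ha|ha|ha|ha|ha <;> rw [hk _ a ha, h] <;> norm_num)
        (fun b hb => by rw [hk _ b hb, h]; norm_num)]
      simp [pvF, List.filter_append, h, List.append_assoc]
    · rw [show pvF 0 xs ++ (pvF 1 xs ++ (pvF 2 xs ++ (pvF 3 xs ++ (pvF 4 xs ++ pvF 99 xs))))
          = (pvF 0 xs ++ (pvF 1 xs ++ (pvF 2 xs ++ (pvF 3 xs ++ (pvF 4 xs ++ pvF 99 xs))))) ++ []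
          by simp]
      rw [pv_insertBy_key pvKeyA x _ []
        (fun a ha => by
          simp only [List.mem_append] at ha
          rcases ha with ha|ha|ha|ha|ha|ha <;> rw [hk _ a ha, h] <;> norm_num)
        (fun b hb => by simp at hb)]
      simp [pvF, List.filter_append, h, List.append_assoc]

-- B's bucket loop: folding appends into six buckets yields the six index-filters
theorem pv_bucket_fold (js : List (PySem.Dict String String))
    (b0 b1 b2 b3 b4 b5 : List (PySem.Dict String String)) :
    js.foldl (fun bs j => bs.modify (pvIdxB j) (fun b => b ++ [j])) [b0, b1, b2, b3, b4, b5]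
    = [b0 ++ js.filter (fun j => pvIdxB j == 0), b1 ++ js.filter (fun j => pvIdxB j == 1),
       b2 ++ js.filter (fun j => pvIdxB j == 2), b3 ++ js.filter (fun j => pvIdxB j == 3),
       b4 ++ js.filter (fun j => pvIdxB j == 4), b5 ++ js.filter (fun j => pvIdxB j == 5)] := by
  induction js generalizing b0 b1 b2 b3 b4 b5 with
  | nil => simp
  | cons j js ih =>
    rcases pv_key_idx j with ⟨_,h⟩|⟨_,h⟩|⟨_,h⟩|⟨_,h⟩|⟨_,h⟩|⟨_,h⟩ <;>
      simp [h, List.modify_cons, ih, List.append_assoc]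

-- B's whole loop with the blank-line skip equals the bucket fold over the parsed jobs
theorem pv_buckets_eq (lines : List String) (init : List (List (PySem.Dict String String))) :
    lines.foldl
      (fun buckets line =>
        if PySem.Str.strip line = "" then buckets
        else
          let job := pvParseLine line
          buckets.modify (pvStateOrder.getD (PySem.Str.upper (job.getD "state" "")) 5).toNat
            (fun b => b ++ [job])) init
      = ((lines.filter (fun l => !(PySem.Str.strip l == ""))).map pvParseLine).foldl
          (fun bs j => bs.modify (pvIdxB j) (fun b => b ++ [j])) init := by
  induction lines generalizing init with
  | nil => rfl
  | cons l ls ih =>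
    by_cases h : PySem.Str.strip l = ""
    · rw [List.foldl_cons, if_pos h, List.filter_cons,
        show (!(PySem.Str.strip l == "")) = false by simp [h]]
      simp only [Bool.false_eq_true, if_false]
      exact ih init
    · rw [List.foldl_cons, if_neg h, List.filter_cons,
        show (!(PySem.Str.strip l == "")) = true by simp [h]]
      simp only [if_true, List.map_cons, List.foldl_cons]
      exact ih _

-- the two key predicates filter identically
theorem pv_filter_key_idx (c : Int) (i : Nat)
    (hci : (c = 0 ∧ i = 0) ∨ (c = 1 ∧ i = 1) ∨ (c = 2 ∧ i = 2) ∨ (c = 3 ∧ i = 3) ∨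
           (c = 4 ∧ i = 4) ∨ (c = 99 ∧ i = 5))
    (js : List (PySem.Dict String String)) :
    pvF c js = js.filter (fun j => pvIdxB j == i) := by
  apply List.filter_congr
  intro j _
  rcases pv_key_idx j with ⟨h1,h2⟩|⟨h1,h2⟩|⟨h1,h2⟩|⟨h1,h2⟩|⟨h1,h2⟩|⟨h1,h2⟩ <;>
    rcases hci with ⟨hc,hi⟩|⟨hc,hi⟩|⟨hc,hi⟩|⟨hc,hi⟩|⟨hc,hi⟩|⟨hc,hi⟩ <;>
    simp [h1, h2, hc, hi]

-- ===== VERDICT (by name: the statement is the Claim_ definition above) =====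
theorem parse_squeue_output_spec : Claim_equal_parse_squeue_output := by
  intro out_ _
  unfold Spec_parse_squeue_output parse_squeue_output parse_squeue_output_alt
  rw [pv_jobs_eq, pv_buckets_eq, pv_bucket_fold]
  simp only [List.nil_append]
  rw [show (fun j : PySem.Dict String String =>
        pvStateOrder.getD (PySem.Str.upper (j.getD "state" "")) 99) = pvKeyA from rfl,
    pv_sorted_buckets]
  rw [pv_filter_key_idx 0 0 (by norm_num), pv_filter_key_idx 1 1 (by norm_num),
    pv_filter_key_idx 2 2 (by norm_num), pv_filter_key_idx 3 3 (by norm_num),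
    pv_filter_key_idx 4 4 (by norm_num), pv_filter_key_idx 99 5 (by norm_num)]
  simp [List.append_assoc]
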